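-- pv_equiv track=rewrite | github.com/LucasGaucher/Python | Py1/jour3.py | trie2
-- ===== SOURCE A (Python) =====
-- def trie2(l: list):
--     l2 = []
--     count = 0
--     for i in range(1, len(l)+1):
--         for j in range(len(l)):
--             count += 1
--             if l[j] == i:
--                 l2.append(i)
--     return l2
-- ===== SOURCE B (Python) =====
-- def trie2(l: list):
--     # One counting pass + direct emission, instead of A's nested rescan per value.
--     counts = {}
--     for x in l:
--         counts[x] = counts.get(x, 0) + 1
--     out = []
--     for i in range(1, len(l) + 1):
--         out += [i] * counts.get(i, 0)
--     return out
-- ===== Notes on version B (the rewrite author's own statement) =====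
-- stated objective: faster
-- what changed: Replaced A's nested loop (rescanning the whole list for every value i in 1..n) by a single counting pass into a dict followed by direct emission of i repeated count[i] times.
import Mathlib
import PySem

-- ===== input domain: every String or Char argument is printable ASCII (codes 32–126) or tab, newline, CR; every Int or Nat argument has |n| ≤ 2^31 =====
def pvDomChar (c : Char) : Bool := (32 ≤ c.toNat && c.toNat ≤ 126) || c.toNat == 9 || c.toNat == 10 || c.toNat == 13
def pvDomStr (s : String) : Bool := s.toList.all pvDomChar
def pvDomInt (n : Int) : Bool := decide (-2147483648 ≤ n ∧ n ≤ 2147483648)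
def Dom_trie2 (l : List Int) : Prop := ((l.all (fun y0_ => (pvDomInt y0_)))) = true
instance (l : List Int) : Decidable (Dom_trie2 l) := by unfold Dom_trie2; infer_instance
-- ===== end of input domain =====

-- B replaces A's nested rescan per value by one counting pass plus direct emission (faster).

-- ===== PORT A =====
def trie2 (l : List Int) : List Int :=
  ((PySem.List.pyRange 1 ((l.length : Int) + 1) 1).foldl
    (fun s i =>
      (PySem.List.pyRange 0 (l.length : Int) 1).foldl
        (fun s j =>
          if PySem.List.pyGetD l j 0 == i then (s.1 ++ [i], s.2 + 1) else (s.1, s.2 + 1))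
        s)
    (([] : List Int), (0 : Int))).1

-- ===== PORT B =====
def trie2_alt (l : List Int) : List Int :=
  let counts : PySem.Dict Int Int :=
    l.foldl (fun d x => d.insert x (d.getD x 0 + 1)) PySem.Dict.empty
  (PySem.List.pyRange 1 ((l.length : Int) + 1) 1).foldl
    (fun out i => out ++ PySem.List.pyRepeat [i] (counts.getD i 0)) []

-- ===== PRECONDITION & SPEC =====
def Spec_trie2 (l : List Int) (out : List Int) : Prop := out = trie2_alt l
instance (l : List Int) (out : List Int) : Decidable (Spec_trie2 l out) := by unfold Spec_trie2; infer_instance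

-- ===== CLAIM (what is proved, stated in full; the proofs are below) =====
def Claim_equal_trie2 : Prop := ∀ (l : List Int), Dom_trie2 l → Spec_trie2 l (trie2 l)

-- ===== LEMMAS AND PROOFS =====

-- A's inner body, elementwise: l2/count after one full scan of l2 looking for i.
theorem pv_pairfold (l2 : List Int) (i : Int) (acc : List Int) (c : Int) :
    l2.foldl (fun s x => if x == i then (s.1 ++ [i], s.2 + 1) else (s.1, s.2 + 1)) (acc, c)
      = (acc ++ List.replicate (l2.count i) i, c + l2.length) := by
  induction l2 generalizing acc c with
  | nil => simp
  | cons a t ih =>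
    simp only [List.foldl_cons]
    by_cases h : a = i
    · subst h
      rw [if_pos (by simp), ih]
      simp [List.replicate_succ, Prod.ext_iff]
      omega
    · rw [if_neg (by simp [h]), ih]
      simp [h, Prod.ext_iff]
      omega

-- A's inner loop over indices equals the elementwise fold.
theorem pv_inner (l : List Int) (i : Int) (s : List Int × Int) :
    (PySem.List.pyRange 0 (l.length : Int) 1).foldl
        (fun s j => if PySem.List.pyGetD l j 0 == i then (s.1 ++ [i], s.2 + 1) else (s.1, s.2 + 1)) s
      = (s.1 ++ List.replicate (l.count i) i, s.2 + l.length) := by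
  obtain ⟨a, c⟩ := s
  exact (PySem.List.foldl_pyRange_zero_pyGetD' l 0
    (fun s x => if x == i then (s.1 ++ [i], s.2 + 1) else (s.1, s.2 + 1)) (a, c)).trans
    (pv_pairfold l i a c)

-- The first component of the simplified pair fold is the plain append fold.
theorem pv_outer' (l : List Int) (R : List Int) (acc : List Int) (c : Int) :
    (R.foldl (fun (s : List Int × Int) i => (s.1 ++ List.replicate (l.count i) i, s.2 + (l.length : Int))) (acc, c)).1
      = R.foldl (fun out i => out ++ List.replicate (l.count i) i) acc := by
  induction R generalizing acc c with
  | nil => rfl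
  | cons r R ih => simp only [List.foldl_cons]; exact ih _ _

-- A's outer loop: the first component is the plain append fold.
theorem pv_outer (l : List Int) (R : List Int) (acc : List Int) (c : Int) :
    (R.foldl
      (fun s i =>
        (PySem.List.pyRange 0 (l.length : Int) 1).foldl
          (fun s j => if PySem.List.pyGetD l j 0 == i then (s.1 ++ [i], s.2 + 1) else (s.1, s.2 + 1))
          s)
      (acc, c)).1
      = R.foldl (fun out i => out ++ List.replicate (l.count i) i) acc := by
  simp only [pv_inner]
  exact pv_outer' l R acc c

-- ===== VERDICT (by name: the statement is the Claim_ definition above) =====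
theorem trie2_spec : Claim_equal_trie2 := by
  intro l _
  unfold Spec_trie2 trie2 trie2_alt
  rw [pv_outer]
  simp only [PySem.Dict.foldl_insert_getD_add_one_eq_counter, PySem.Dict.getD_counter,
    PySem.List.pyRepeat_singleton, Int.toNat_natCast]
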